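-- pv_equiv track=rewrite | github.com/JULU909/Natural-Language-Projector | Hi-sam/text_sweep.py | link_pairs
-- ===== SOURCE A (Python) =====
-- from collections import defaultdict, deque
-- from collections import defaultdict
--
-- def link_pairs(pairs):
--     graph = defaultdict(list)
--     edges_count = 0
--
--     for a, b, c, d in pairs:
--         graph[a].append(b)
--         graph[b].append(a)
--         edges_count += 1
--
--     visited_edges = set()
--     linked_nodes = set()
--     linked_pairs_list = []  # Store all linked paths (nested list)
--
--     start_node = None
--     for node, neighbors in graph.items():
--         if len(neighbors) == 1:  # Degree 1 node
--             start_node = node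
--             break
--     if start_node is None:
--         # If no degree 1 node, pick any node
--         start_node = next(iter(graph))
--
--     def dfs(node, current_path):
--         for neighbor in graph[node]:
--             if (node, neighbor) not in visited_edges and (neighbor, node) not in visited_edges:
--                 visited_edges.add((node, neighbor))
--                 visited_edges.add((neighbor, node))
--                 current_path.append((node, neighbor))
--                 linked_nodes.add(node)
--                 linked_nodes.add(neighbor)
--                 dfs(neighbor, current_path)
--
--     current_path = []
--     dfs(start_node, current_path)
--     if current_path:  # Add the first path (starting from start_node)
--         linked_pairs_list.append(current_path)
--
--     for node in graph:
--         if node not in linked_nodes: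
--             current_path = []
--             dfs(node, current_path)
--             if current_path:  # Add the path for the next component
--                 linked_pairs_list.append(current_path)
--
--     # Debug: Check remaining edges
--
--     return linked_pairs_list
-- ===== SOURCE B (Python) =====
-- def link_pairs(pairs):
--     # Same graph construction as the original; the DFS is replaced by an
--     # iterative walker with an explicit stack of (node, iterator) frames.
--     graph = {}
--     for a, b, _c, _d in pairs:
--         graph.setdefault(a, []).append(b)
--         graph.setdefault(b, []).append(a)
--     if not graph:
--         return []
--
--     visited_edges = set()
--     linked_nodes = set()
--
--     def walk(start):
--         path = []
--         stack = [(start, iter(graph[start]))]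
--         while stack:
--             node, it = stack[-1]
--             for nb in it:
--                 if (node, nb) not in visited_edges:
--                     visited_edges.add((node, nb))
--                     visited_edges.add((nb, node))
--                     path.append((node, nb))
--                     linked_nodes.add(node)
--                     linked_nodes.add(nb)
--                     stack.append((nb, iter(graph[nb])))
--                     break
--             else:
--                 stack.pop()
--         return path
--
--     start_node = next((n for n, ns in graph.items() if len(ns) == 1),
--                       next(iter(graph)))
--     result = []
--     path = walk(start_node)
--     if path:
--         result.append(path)
--     for node in graph:
--         if node not in linked_nodes:
--             path = walk(node)
--             if path:
--                 result.append(path)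
--     return result
-- ===== Notes on version B (the rewrite author's own statement) =====
-- stated objective: alternative
-- what changed: The recursive dfs is replaced by an iterative walker that drives an explicit stack of (node, remaining-neighbours) frames, reproducing the same edge-discovery order without recursion.
-- outside the precondition, e.g. on link_pairs([]): A raises StopIteration, B returns []
import Mathlib
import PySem

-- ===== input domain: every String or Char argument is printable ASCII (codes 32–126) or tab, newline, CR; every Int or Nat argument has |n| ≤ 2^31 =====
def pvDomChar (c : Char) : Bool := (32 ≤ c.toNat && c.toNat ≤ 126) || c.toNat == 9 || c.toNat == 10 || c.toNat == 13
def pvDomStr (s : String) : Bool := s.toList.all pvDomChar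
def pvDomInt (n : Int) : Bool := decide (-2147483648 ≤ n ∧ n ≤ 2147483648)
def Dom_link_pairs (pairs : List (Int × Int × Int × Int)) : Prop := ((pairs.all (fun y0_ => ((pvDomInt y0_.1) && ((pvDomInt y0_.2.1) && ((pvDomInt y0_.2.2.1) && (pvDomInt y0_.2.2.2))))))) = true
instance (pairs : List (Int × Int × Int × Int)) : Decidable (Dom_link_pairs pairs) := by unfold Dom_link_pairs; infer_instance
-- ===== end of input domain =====

-- B replaces A's recursive DFS by an iterative walker with an explicit stack of
-- (node, remaining-neighbours) frames (same outputs; objective: alternative decomposition).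

-- State threaded by both programs: (visited_edges, linked_nodes, current_path).
abbrev LPSt := PySem.Set (Int × Int) × PySem.Set Int × List (Int × Int)

-- the five updates both Pythons perform when an unvisited edge (node, nb) is taken
def lpVisit (node nb : Int) (st : LPSt) : LPSt :=
  (PySem.Set.add (PySem.Set.add st.1 (node, nb)) (nb, node),
   PySem.Set.add (PySem.Set.add st.2.1 node) nb,
   st.2.2 ++ [(node, nb)])

-- graph[node] (node is always a present key; defaultdict default shown for totality)
def lpAdj (g : PySem.Dict Int (List Int)) (node : Int) : List Int := g.getD node []

-- ===== PORT A =====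

-- graph = defaultdict(list); graph[a].append(b); graph[b].append(a)
def lpGraphA (pairs : List (Int × Int × Int × Int)) : PySem.Dict Int (List Int) :=
  pairs.foldl (fun g p =>
    let g1 := g.insert p.1 (g.getD p.1 [] ++ [p.2.1])
    g1.insert p.2.1 (g1.getD p.2.1 [] ++ [p.1])) PySem.Dict.empty

-- A's recursive dfs.  Python's recursion carries no fuel; the Nat argument is a
-- totality device only: it is threaded through (and returned), decreasing by one per
-- edge visit, and at top level it is pairs.length + 1, more than the number of
-- distinct edges, so the 0-branches are never taken on the call made by link_pairs.
def lpDfsA (g : PySem.Dict Int (List Int)) : Nat → Int → List Int → LPSt → LPSt × Nat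
  | 0, _, _, st => (st, 0)
  | f+1, _, [], st => (st, f+1)
  | f+1, node, nb :: rest, st =>
    if (node, nb) ∉ st.1 ∧ (nb, node) ∉ st.1 then
      let r := lpDfsA g f nb (lpAdj g nb) (lpVisit node nb st)
      -- 'min r.2 f' = r.2 (proved below); min only justifies termination
      lpDfsA g (min r.2 f) node rest r.1
    else
      lpDfsA g (f+1) node rest st
termination_by f _ nbrs => (f, nbrs.length)
decreasing_by
  · exact Prod.Lex.left _ _ (Nat.lt_succ_self f)
  · exact Prod.Lex.left _ _ (Nat.lt_succ_of_le (Nat.min_le_right _ _))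
  · exact Prod.Lex.right _ (Nat.lt_succ_self _)

-- phase 1 (dfs from start_node) + phase 2 (dfs from every node not yet linked);
-- fold state = (linked_pairs_list, visited_edges, linked_nodes)
def lpTailA (g : PySem.Dict Int (List Int)) (F : Nat) (start : Int) :
    List (List (Int × Int)) :=
  let r := lpDfsA g F start (lpAdj g start) ([], [], [])
  let out0 : List (List (Int × Int)) := if r.1.2.2.isEmpty then [] else [r.1.2.2]
  (g.keys.foldl (fun acc node =>
      if node ∉ acc.2.2 then
        let r2 := lpDfsA g F node (lpAdj g node) (acc.2.1, acc.2.2, [])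
        (if r2.1.2.2.isEmpty then acc.1 else acc.1 ++ [r2.1.2.2], r2.1.1, r2.1.2.1)
      else acc)
    (out0, r.1.1, r.1.2.1)).1

def link_pairs (pairs : List (Int × Int × Int × Int)) : List (List (Int × Int)) :=
  let g := lpGraphA pairs
  -- edges_count is computed by the Python but never used afterwards; omitted
  match (g.items.find? (fun p => p.2.length == 1)).map (·.1) with
  | some s => lpTailA g (pairs.length + 1) s
  | none =>
    match g.keys with
    | [] => []          -- Python: next(iter(graph)) raises StopIteration; outside Pre_
    | k :: _ => lpTailA g (pairs.length + 1) k

-- ===== PORT B =====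

-- graph = {}; graph.setdefault(a, []).append(b); graph.setdefault(b, []).append(a)
def lpGraphB (pairs : List (Int × Int × Int × Int)) : PySem.Dict Int (List Int) :=
  pairs.foldl (fun g p =>
    let g1 := g.setdefault p.1 []
    let g2 := g1.insert p.1 (g1.getD p.1 [] ++ [p.2.1])
    let g3 := g2.setdefault p.2.1 []
    g3.insert p.2.1 (g3.getD p.2.1 [] ++ [p.1])) PySem.Dict.empty

-- the 'for nb in it: if (node, nb) not in visited_edges: … break' scan of a frame:
-- first neighbour with an unvisited edge, and the iterator's remaining elements
def lpScan (vis : PySem.Set (Int × Int)) (node : Int) : List Int → Option (Int × List Int)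
  | [] => none
  | nb :: rest => if (node, nb) ∉ vis then some (nb, rest) else lpScan vis node rest

-- B's while-loop over the explicit stack of (node, remaining-neighbours) frames.
-- Fuel is a totality device (one unit per edge visit, pairs.length + 1 at top level).
def lpRun (g : PySem.Dict Int (List Int)) : Nat → List (Int × List Int) → LPSt → LPSt
  | _, [], st => st
  | 0, _ :: _, st => st
  | f+1, (node, rest) :: stk, st =>
    match lpScan st.1 node rest with
    | none => lpRun g (f+1) stk st
    | some (nb, rest') =>
      lpRun g f ((nb, lpAdj g nb) :: (node, rest') :: stk) (lpVisit node nb st)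
termination_by f stk => (f, stk.length)
decreasing_by
  · exact Prod.Lex.right _ (Nat.lt_succ_self _)
  · exact Prod.Lex.left _ _ (Nat.lt_succ_self f)

-- walk(start)
def lpWalkB (g : PySem.Dict Int (List Int)) (F : Nat) (start : Int) (st : LPSt) : LPSt :=
  lpRun g F [(start, lpAdj g start)] st

def lpTailB (g : PySem.Dict Int (List Int)) (F : Nat) (start : Int) :
    List (List (Int × Int)) :=
  let r := lpWalkB g F start ([], [], [])
  let out0 : List (List (Int × Int)) := if r.2.2.isEmpty then [] else [r.2.2]
  (g.keys.foldl (fun acc node =>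
      if node ∉ acc.2.2 then
        let r2 := lpWalkB g F node (acc.2.1, acc.2.2, [])
        (if r2.2.2.isEmpty then acc.1 else acc.1 ++ [r2.2.2], r2.1, r2.2.1)
      else acc)
    (out0, r.1, r.2.1)).1

def link_pairs_alt (pairs : List (Int × Int × Int × Int)) : List (List (Int × Int)) :=
  let g := lpGraphB pairs
  if g.keys.isEmpty then []
  else
    let start := match g.items.find? (fun p => p.2.length == 1) with
                 | some p => p.1
                 | none => g.keys.headD 0
    lpTailB g (pairs.length + 1) start

-- ===== PRECONDITION & SPEC =====

-- On pairs = [] the graph is empty and A's 'next(iter(graph))' raises StopIteration;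
-- that is the only input excluded.
def Pre_link_pairs (pairs : List (Int × Int × Int × Int)) : Prop := pairs ≠ []
instance (pairs : List (Int × Int × Int × Int)) : Decidable (Pre_link_pairs pairs) := by
  unfold Pre_link_pairs; infer_instance

def pvWitness_link_pairs : (List (Int × Int × Int × Int)) := [(0, 1, 0, 0)]

def Spec_link_pairs (pairs : List (Int × Int × Int × Int)) (out : List (List (Int × Int))) : Prop := out = link_pairs_alt pairs
instance (pairs : List (Int × Int × Int × Int)) (out : List (List (Int × Int))) : Decidable (Spec_link_pairs pairs out) := by unfold Spec_link_pairs; infer_instance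

-- ===== CLAIM (what is proved, stated in full; the proofs are below) =====
def Claim_equal_link_pairs : Prop := ∀ (pairs : List (Int × Int × Int × Int)), Dom_link_pairs pairs → Pre_link_pairs pairs → Spec_link_pairs pairs (link_pairs pairs)

-- ===== LEMMAS AND PROOFS =====

-- visited_edges is kept symmetric by both programs
def lpSym (vis : PySem.Set (Int × Int)) : Prop := ∀ u v : Int, (u, v) ∈ vis → (v, u) ∈ vis


lemma lpSym_nil : lpSym ([] : PySem.Set (Int × Int)) := by
  intro u v h; simp at h

lemma lpVisit_sym (node nb : Int) (st : LPSt) (h : lpSym st.1) :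
    lpSym (lpVisit node nb st).1 := by
  intro u v huv
  simp only [lpVisit, PySem.Set.mem_add, Prod.mk.injEq] at *
  rcases huv with (huv | ⟨h1, h2⟩) | ⟨h1, h2⟩
  · exact Or.inl (Or.inl (h u v huv))
  · exact Or.inr ⟨h2, h1⟩
  · exact Or.inl (Or.inr ⟨h2, h1⟩)


lemma lpDfsA_fuel_le (g : PySem.Dict Int (List Int)) (f : Nat) (node : Int)
    (nbrs : List Int) (st : LPSt) : (lpDfsA g f node nbrs st).2 ≤ f := by
  fun_induction lpDfsA g f node nbrs st with
  | case1 => simp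
  | case2 => simp
  | case3 f node nb rest st hcond r ihi iho =>
    exact le_trans iho (le_trans (Nat.min_le_right _ _) (Nat.le_succ f))
  | case4 f node nb rest st hcond ih => exact ih

lemma lpDfsA_sym (g : PySem.Dict Int (List Int)) (f : Nat) (node : Int)
    (nbrs : List Int) (st : LPSt) :
    lpSym st.1 → lpSym (lpDfsA g f node nbrs st).1.1 := by
  fun_induction lpDfsA g f node nbrs st with
  | case1 => exact id
  | case2 => exact id
  | case3 f node nb rest st hcond r ihi iho =>
    intro hs
    exact iho (ihi (lpVisit_sym node nb st hs))
  | case4 f node nb rest st hcond ih => exact ih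

lemma lpRun_sim (g : PySem.Dict Int (List Int)) (f : Nat) (node : Int)
    (nbrs : List Int) (st : LPSt) :
    ∀ stk, lpSym st.1 →
      lpRun g f ((node, nbrs) :: stk) st =
        lpRun g (lpDfsA g f node nbrs st).2 stk (lpDfsA g f node nbrs st).1 := by
  fun_induction lpDfsA g f node nbrs st with
  | case1 node nbrs st =>
    intro stk hs
    cases stk <;> simp [lpRun]
  | case2 f node st =>
    intro stk hs
    simp [lpRun, lpScan]
  | case3 f node nb rest st hcond r ihi iho =>
    intro stk hs
    have hscan : lpScan st.1 node (nb :: rest) = some (nb, rest) := by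
      simp [lpScan, hcond.1]
    have hsv : lpSym (lpVisit node nb st).1 := lpVisit_sym node nb st hs
    have hmin : min r.2 f = r.2 := min_eq_left (lpDfsA_fuel_le g f nb (lpAdj g nb) (lpVisit node nb st))
    rw [lpRun, hscan]
    dsimp only
    rw [ihi _ hsv]
    have hsr : lpSym r.1.1 := lpDfsA_sym g f nb (lpAdj g nb) (lpVisit node nb st) hsv
    have iho' := iho stk hsr
    rw [hmin] at iho' ⊢
    exact iho'
  | case4 f node nb rest st hcond ih =>
    intro stk hs
    have hmem : (node, nb) ∈ st.1 := by
      rcases not_and_or.mp hcond with h | h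
      · simpa using h
      · exact hs _ _ (by simpa using h)
    have hscan : lpScan st.1 node (nb :: rest) = lpScan st.1 node rest := by
      simp [lpScan, hmem]
    have hstep : lpRun g (f+1) ((node, nb :: rest) :: stk) st
        = lpRun g (f+1) ((node, rest) :: stk) st := by
      rw [lpRun, lpRun, hscan]
    rw [hstep]
    exact ih stk hs

lemma lpWalkB_eq (g : PySem.Dict Int (List Int)) (F : Nat) (node : Int) (st : LPSt)
    (hs : lpSym st.1) :
    lpWalkB g F node st = (lpDfsA g F node (lpAdj g node) st).1 := by
  unfold lpWalkB
  rw [lpRun_sim g F node (lpAdj g node) st [] hs]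
  rw [lpRun]

lemma lpSetdefaultAppend (d : PySem.Dict Int (List Int)) (k v : Int) :
    (d.setdefault k []).insert k ((d.setdefault k []).getD k [] ++ [v])
      = d.insert k (d.getD k [] ++ [v]) := by
  by_cases h : d.contains k = true
  · rw [PySem.Dict.setdefault_of_contains d [] h]
  · have h' : d.contains k = false := by simpa using h
    rw [PySem.Dict.setdefault_of_not_contains d [] h',
      PySem.Dict.getD_insert_self, PySem.Dict.insert_insert_self,
      PySem.Dict.getD_of_not_contains d _ h']

lemma lpGraph_eq (pairs : List (Int × Int × Int × Int)) :
    lpGraphB pairs = lpGraphA pairs := by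
  unfold lpGraphA lpGraphB
  congr 1
  funext g p
  dsimp only
  rw [lpSetdefaultAppend, lpSetdefaultAppend]

lemma lpGraphA_contains_mono (pairs : List (Int × Int × Int × Int)) (k : Int) :
    ∀ g : PySem.Dict Int (List Int), g.contains k = true →
      (pairs.foldl (fun g p =>
        let g1 := g.insert p.1 (g.getD p.1 [] ++ [p.2.1])
        g1.insert p.2.1 (g1.getD p.2.1 [] ++ [p.1])) g).contains k = true := by
  induction pairs with
  | nil => intro g h; exact h
  | cons p rest ih =>
    intro g h
    exact ih _ (by simp [PySem.Dict.contains_insert, h])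

lemma lpGraphA_keys_ne (pairs : List (Int × Int × Int × Int)) (h : pairs ≠ []) :
    (lpGraphA pairs).keys ≠ [] := by
  obtain ⟨p, rest, rfl⟩ : ∃ p rest, pairs = p :: rest := by
    cases pairs with
    | nil => exact absurd rfl h
    | cons p rest => exact ⟨p, rest, rfl⟩
  have hc : (lpGraphA (p :: rest)).contains p.1 = true := by
    unfold lpGraphA
    rw [List.foldl_cons]
    exact lpGraphA_contains_mono rest p.1 _
      (by simp [PySem.Dict.contains_insert])
  exact List.ne_nil_of_mem ((PySem.Dict.contains_iff_mem_keys _ _).mp hc)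

lemma lpTail_eq (g : PySem.Dict Int (List Int)) (F : Nat) (s : Int) :
    lpTailA g F s = lpTailB g F s := by
  unfold lpTailA lpTailB
  rw [lpWalkB_eq g F s ([], [], []) lpSym_nil]
  dsimp only
  congr 1
  have main : ∀ (keys : List Int)
      (acc : List (List (Int × Int)) × PySem.Set (Int × Int) × PySem.Set Int),
      lpSym acc.2.1 →
      keys.foldl (fun acc node =>
        if node ∉ acc.2.2 then
          let r2 := lpDfsA g F node (lpAdj g node) (acc.2.1, acc.2.2, [])
          (if r2.1.2.2.isEmpty then acc.1 else acc.1 ++ [r2.1.2.2], r2.1.1, r2.1.2.1)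
        else acc) acc
      = keys.foldl (fun acc node =>
        if node ∉ acc.2.2 then
          let r2 := lpWalkB g F node (acc.2.1, acc.2.2, [])
          (if r2.2.2.isEmpty then acc.1 else acc.1 ++ [r2.2.2], r2.1, r2.2.1)
        else acc) acc := by
    intro keys
    induction keys with
    | nil => intro acc _; rfl
    | cons k t ih =>
      intro acc hs
      rw [List.foldl_cons, List.foldl_cons]
      by_cases hk : k ∉ acc.2.2
      · have hw := lpWalkB_eq g F k (acc.2.1, acc.2.2, []) hs
        have hstep : (if k ∉ acc.2.2 then
              let r2 := lpWalkB g F k (acc.2.1, acc.2.2, [])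
              (if r2.2.2.isEmpty then acc.1 else acc.1 ++ [r2.2.2], r2.1, r2.2.1)
            else acc)
            = (let r2 := lpDfsA g F k (lpAdj g k) (acc.2.1, acc.2.2, [])
              (if r2.1.2.2.isEmpty then acc.1 else acc.1 ++ [r2.1.2.2], r2.1.1, r2.1.2.1)) := by
          rw [if_pos hk, hw]
        rw [if_pos hk, hstep]
        exact ih _ (lpDfsA_sym g F k (lpAdj g k) (acc.2.1, acc.2.2, []) hs)
      · rw [if_neg hk, if_neg hk]
        exact ih acc hs
  exact main g.keys _ (lpDfsA_sym g F s (lpAdj g s) ([], [], []) lpSym_nil)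

-- ===== VERDICT (by name: the statement is the Claim_ definition above) =====
theorem link_pairs_spec : Claim_equal_link_pairs := by
  intro pairs _ hpre
  unfold Spec_link_pairs link_pairs link_pairs_alt
  rw [lpGraph_eq]
  dsimp only
  have hkeys := lpGraphA_keys_ne pairs hpre
  have hne : (lpGraphA pairs).keys.isEmpty = false := by
    cases hk : (lpGraphA pairs).keys with
    | nil => exact absurd hk hkeys
    | cons a t => rfl
  rw [hne]
  simp only [Bool.false_eq_true, ite_false]
  cases hfind : (lpGraphA pairs).items.find? (fun p => p.2.length == 1) with
  | some p =>
    simp only [Option.map_some]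
    exact lpTail_eq _ _ _
  | none =>
    cases hk : (lpGraphA pairs).keys with
    | nil => exact absurd hk hkeys
    | cons k t =>
      simp only [Option.map_none, List.headD_cons]
      exact lpTail_eq _ _ _
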